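-- pv_equiv track=rewrite | github.com/artimahub/scala3 | check_docs.py | is_documented
-- ===== SOURCE A (Python) =====
-- def is_documented(lines, line_idx):
--     """Check if there's a scaladoc comment (/** ... */) before this line."""
--     # Look backwards for documentation, skipping over regular comments and annotations
--     i = line_idx - 1
--     found_scaladoc = False
--
--     while i >= 0:
--         line = lines[i].strip()
--
--         # Empty line - keep looking
--         if not line:
--             i -= 1
--             continue
--
--         # Regular single-line comment - skip it and keep looking
--         if line.startswith('//'):
--             i -= 1
--             continue
--
--         # Annotation - skip it and keep looking
--         if line.startswith('@'):
--             i -= 1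
--             continue
--
--         # End of a multi-line comment
--         if line.endswith('*/'):
--             # Find the start of this comment block
--             j = i
--             comment_lines = []
--             while j >= 0:
--                 comment_lines.append(lines[j])
--                 if '/**' in lines[j]:
--                     # Found a scaladoc comment
--                     found_scaladoc = True
--                     break
--                 elif '/*' in lines[j] and '/**' not in lines[j]:
--                     # Found a regular multi-line comment, not scaladoc
--                     break
--                 j -= 1
--
--             # If we found scaladoc, we're done - return True
--             if found_scaladoc:
--                 return True
--
--             # Otherwise, continue looking backwards from before this comment
--             i = j - 1
--             continue
--
--         # Hit some other non-comment content
--         # At this point, we've checked all comments/annotations before the definition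
--         return found_scaladoc
--
--     return found_scaladoc
-- ===== SOURCE B (Python) =====
-- def is_documented(lines, line_idx):
--     """Check if there's a scaladoc comment (/** ... */) before this line."""
--     in_comment = False
--     for i in range(line_idx - 1, -1, -1):
--         raw = lines[i]
--         if in_comment:
--             # Inside a block comment, scanning for its opening line
--             if '/**' in raw:
--                 return True
--             if '/*' in raw:
--                 in_comment = False  # plain block comment: resume normal scan
--             continue
--         s = raw.strip()
--         if not s or s.startswith('//') or s.startswith('@'):
--             continue
--         if s.endswith('*/'):
--             if '/**' in raw:
--                 return True
--             if '/*' not in raw: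
--                 in_comment = True
--             continue
--         return False
--     return False
-- ===== Notes on version B (the rewrite author's own statement) =====
-- stated objective: simpler
-- what changed: Replaced A's while-loop with a nested inner scan over the comment block (and a dead comment_lines accumulator) by a single backward for-loop carrying an in_comment boolean state.
import Mathlib
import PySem

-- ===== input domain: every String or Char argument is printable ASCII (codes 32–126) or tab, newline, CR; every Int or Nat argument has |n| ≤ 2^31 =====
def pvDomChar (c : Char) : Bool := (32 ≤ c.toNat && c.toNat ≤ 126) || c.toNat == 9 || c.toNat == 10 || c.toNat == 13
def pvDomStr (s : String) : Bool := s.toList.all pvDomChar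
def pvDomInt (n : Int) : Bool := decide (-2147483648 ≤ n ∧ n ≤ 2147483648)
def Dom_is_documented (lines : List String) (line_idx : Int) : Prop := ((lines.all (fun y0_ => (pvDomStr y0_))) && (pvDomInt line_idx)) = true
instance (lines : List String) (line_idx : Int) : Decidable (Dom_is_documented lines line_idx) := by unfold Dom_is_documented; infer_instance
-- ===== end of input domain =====

-- B replaces A's nested inner comment-block scan by one backward loop carrying an in_comment flag (simpler); return values proved equal whenever line_idx ≤ len(lines).

-- ===== PORT A =====
-- inner 'while j >= 0' scan: returns (found_scaladoc, j at loop exit: break index, or -1 if exhausted)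
def aInner (lines : List String) : Nat → (Bool × Int)
  | 0 => (false, -1)
  | n+1 =>
    match PySem.List.pyGet? lines (n : Int) with
    | none => (false, -1)      -- lines[j] out of range: unreachable under Pre_
    | some l =>
      if PySem.Str.isIn "/**" l then (true, (n : Int))
      else if PySem.Str.isIn "/*" l && !(PySem.Str.isIn "/**" l) then (false, (n : Int))
      else aInner lines n

-- needed by aLoop's decreasing_by: the break index is below the fuel
lemma aInner_snd_lt (lines : List String) : ∀ m : Nat, (aInner lines m).2 < (m : Int) := by
  intro m
  induction m with
  | zero => simp [aInner]
  | succ n ih =>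
    rw [aInner]
    cases h : PySem.List.pyGet? lines (n : Int) with
    | none => simp
    | some l =>
      simp only
      split_ifs
      · simp
      · simp
      · push_cast; omega

-- outer 'while i >= 0' loop of A, fuel n = i + 1
def aLoop (lines : List String) : Nat → Bool
  | 0 => false
  | n+1 =>
    match PySem.List.pyGet? lines (n : Int) with
    | none => false            -- lines[i] out of range: unreachable under Pre_
    | some raw =>
      let line := PySem.Str.strip raw
      if line = "" then aLoop lines n
      else if PySem.Str.startswith line "//" then aLoop lines n
      else if PySem.Str.startswith line "@" then aLoop lines n
      else if PySem.Str.endswith line "*/" then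
        let r := aInner lines (n+1)
        if r.1 then true
        else aLoop lines r.2.toNat     -- i = j - 1, continue
      else false
  decreasing_by
  all_goals first
    | omega
    | (have := aInner_snd_lt lines (n+1); omega)

def is_documented (lines : List String) (line_idx : Int) : Bool :=
  aLoop lines line_idx.toNat

-- ===== PORT B =====
-- single backward loop, fuel n = i + 1, carrying the in_comment state
def bLoop (lines : List String) (inComment : Bool) : Nat → Bool
  | 0 => false
  | n+1 =>
    match PySem.List.pyGet? lines (n : Int) with
    | none => false            -- lines[i] out of range: unreachable under Pre_
    | some raw =>
      if inComment then
        if PySem.Str.isIn "/**" raw then true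
        else if PySem.Str.isIn "/*" raw then bLoop lines false n
        else bLoop lines true n
      else
        let s := PySem.Str.strip raw
        if s = "" || PySem.Str.startswith s "//" || PySem.Str.startswith s "@" then
          bLoop lines inComment n
        else if PySem.Str.endswith s "*/" then
          if PySem.Str.isIn "/**" raw then true
          else if !(PySem.Str.isIn "/*" raw) then bLoop lines true n
          else bLoop lines false n
        else false

def is_documented_alt (lines : List String) (line_idx : Int) : Bool :=
  bLoop lines false line_idx.toNat

-- ===== PRECONDITION & SPEC =====
-- A raises IndexError when line_idx - 1 ≥ len(lines); everywhere else it returns.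
def Pre_is_documented (lines : List String) (line_idx : Int) : Prop := line_idx ≤ (lines.length : Int)
instance (lines : List String) (line_idx : Int) : Decidable (Pre_is_documented lines line_idx) := by unfold Pre_is_documented; infer_instance
def pvWitness_is_documented : List String × Int := (["/** doc */", "def f = 1"], 1)

def Spec_is_documented (lines : List String) (line_idx : Int) (out : Bool) : Prop := out = is_documented_alt lines line_idx
instance (lines : List String) (line_idx : Int) (out : Bool) : Decidable (Spec_is_documented lines line_idx out) := by unfold Spec_is_documented; infer_instance

-- ===== CLAIM (what is proved, stated in full; the proofs are below) =====
def Claim_equal_is_documented : Prop := ∀ (lines : List String) (line_idx : Int), Dom_is_documented lines line_idx → Pre_is_documented lines line_idx → Spec_is_documented lines line_idx (is_documented lines line_idx)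

-- ===== LEMMAS AND PROOFS =====

-- main invariant: B's in_comment=false state runs A's outer loop; B's in_comment=true state
-- runs A's inner scan followed by A's resume from the break index
lemma loop_key (lines : List String) : ∀ n : Nat,
    aLoop lines n = bLoop lines false n ∧
    bLoop lines true n = (if (aInner lines n).1 then true else aLoop lines (aInner lines n).2.toNat) := by
  intro n
  induction n with
  | zero => simp [aLoop, bLoop, aInner]
  | succ n ih =>
    obtain ⟨ih1, ih2⟩ := ih
    constructor
    · rw [aLoop.eq_def, bLoop.eq_def]
      cases h : PySem.List.pyGet? lines (n : Int) with
      | none => simp [h]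
      | some raw =>
        simp only [aInner, h]
        by_cases e1 : PySem.Str.strip raw = ""
        · simp only [if_pos e1, decide_eq_true e1]
          exact ih1
        · simp only [if_neg e1, decide_eq_false e1]
          cases hb2 : PySem.Str.startswith (PySem.Str.strip raw) "//" with
          | true => exact ih1
          | false =>
            cases hb3 : PySem.Str.startswith (PySem.Str.strip raw) "@" with
            | true => exact ih1
            | false =>
              cases hb4 : PySem.Str.endswith (PySem.Str.strip raw) "*/" with
              | false => rfl
              | true =>
                cases hf1 : PySem.Str.isIn "/**" raw with
                | true => rfl
                | false =>
                  cases hf2 : PySem.Str.isIn "/*" raw with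
                  | true => exact ih1
                  | false => exact ih2.symm
    · rw [bLoop.eq_def, aInner]
      cases h : PySem.List.pyGet? lines (n : Int) with
      | none => simp [h, aLoop]
      | some raw =>
        simp only [h]
        cases hf1 : PySem.Str.isIn "/**" raw with
        | true => rfl
        | false =>
          cases hf2 : PySem.Str.isIn "/*" raw with
          | true => exact ih1.symm
          | false => exact ih2

-- ===== VERDICT (by name: the statement is the Claim_ definition above) =====
theorem is_documented_spec : Claim_equal_is_documented := by
  intro lines line_idx _ _
  unfold Spec_is_documented is_documented is_documented_alt
  exact (loop_key lines line_idx.toNat).1
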